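-- pv_equiv track=rewrite | github.com/openFyde/chromiumos-overlay | dev-rust/third-party-crates-src/files/migration_utils.py | is_semver_compatible_upgrade
-- ===== SOURCE A (Python) =====
-- from typing import Optional, Tuple
--
-- def is_semver_compatible_upgrade(old: str, new: str) -> bool:
--     """Returns true if `new` is semver compatible with `old`."""
--     if old == new:
--         return True
--
--     def ver_split(ver: str) -> Tuple[str, str]:
--         """Splits beta/etc off of `ver`."""
--         x = ver.split("_", 1)
--         if len(x) == 2:
--             return tuple(x)
--         return x[0], ""
--
--     old_ver, old_suffix = ver_split(old)
--     new_ver, new_suffix = ver_split(new)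
--     new_maj, new_min, new_patch = (int(x) for x in new_ver.split("."))
--     old_maj, old_min, old_patch = (int(x) for x in old_ver.split("."))
--
--     # Major versions are incompatible.
--     if new_maj != old_maj:
--         return False
--
--     if new_maj == 0:
--         # As are minor versions, if major == 0.
--         if new_min != old_min:
--             return False
--
--     # The versions are compatible in _some_ direction.
--     if old_min > new_min:
--         return False
--
--     if new_min > old_min:
--         return True
--
--     if old_patch > new_patch:
--         return False
--
--     if new_patch > old_patch:
--         return True
--
--     if new_suffix and not old_suffix:
--         return False
--
--     if old_suffix and not new_suffix:
--         return True
--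
--     return new_suffix >= old_suffix
-- ===== SOURCE B (Python) =====
-- def is_semver_compatible_upgrade(old: str, new: str) -> bool:
--     """Returns true if `new` is semver compatible with `old`."""
--     if old == new:
--         return True
--
--     def tokens(ver):
--         # flatten a version into (major, homogeneous int key list):
--         # [minor, patch, release-rank, suffix codepoints...]; a release
--         # (empty suffix) ranks above any pre-release suffix.
--         head, _, suffix = ver.partition("_")
--         maj, mi, pa = (int(x) for x in head.split("."))
--         return maj, [mi, pa, 1 if not suffix else 0] + [ord(c) for c in suffix]
--
--     def lex_ge(xs, ys):
--         # recursive lexicographic comparison of int lists: xs >= ys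
--         if not ys:
--             return True
--         if not xs:
--             return False
--         if xs[0] != ys[0]:
--             return xs[0] > ys[0]
--         return lex_ge(xs[1:], ys[1:])
--
--     omaj, okey = tokens(old)
--     nmaj, nkey = tokens(new)
--
--     if nmaj != omaj or (nmaj == 0 and nkey[0] != okey[0]):
--         return False
--     return lex_ge(nkey, okey)
-- ===== Notes on version B (the rewrite author's own statement) =====
-- stated objective: alternative
-- what changed: B flattens each version into one homogeneous integer key list [minor, patch, release-rank, suffix codepoints...] (empty suffix ranks above any pre-release) and decides with a single recursive lexicographic list comparison lex_ge, replacing A's six-step if/return ladder over ints, suffix-emptiness tests and a string comparison; only the two hard guards (major mismatch; minor mismatch when major==0) remain.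
import Mathlib
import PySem

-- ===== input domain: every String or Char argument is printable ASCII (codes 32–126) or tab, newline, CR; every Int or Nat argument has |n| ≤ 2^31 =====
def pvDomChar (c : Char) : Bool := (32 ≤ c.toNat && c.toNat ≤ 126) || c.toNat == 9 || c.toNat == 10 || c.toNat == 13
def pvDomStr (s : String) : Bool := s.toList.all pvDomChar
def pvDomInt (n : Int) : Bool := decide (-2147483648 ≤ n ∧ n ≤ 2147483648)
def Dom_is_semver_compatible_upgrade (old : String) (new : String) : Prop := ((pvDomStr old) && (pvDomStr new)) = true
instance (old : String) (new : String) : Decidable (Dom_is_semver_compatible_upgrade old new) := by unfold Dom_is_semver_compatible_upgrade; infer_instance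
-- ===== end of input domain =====

-- B keeps A's parse and the two hard guards but replaces A's six-step if/return ladder and string
-- comparison by flattening each version into one homogeneous int key list
-- [minor, patch, release-rank, suffix codepoints...] decided with a single recursive lexicographic
-- list comparison; objective: alternative.


-- ===== PORT A =====
-- ver.split("_", 1): two pieces if "_" occurs, else (ver, "")
def pvVerSplitA (ver : String) : String × String :=
  let x := (PySem.Str.splitMax? ver "_" 1).getD []
  match x with
  | [a, b] => (a, b)
  | _ => (x.headD "", "")

-- (int(x) for x in ver.split(".")) unpacked into a 3-tuple; none exactly where Python raises ValueError
def pvParse3A (ver : String) : Option (Int × Int × Int) :=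
  match ((PySem.Str.split? ver ".").getD []).map PySem.Int.ofStr? with
  | [some a, some b, some c] => some (a, b, c)
  | _ => none

def is_semver_compatible_upgrade (old : String) (new : String) : Bool :=
  if old == new then true
  else
    match pvParse3A (pvVerSplitA new).1, pvParse3A (pvVerSplitA old).1 with
    | some (nmaj, nmin, npat), some (omaj, omin, opat) =>
      if nmaj != omaj then false
      else if nmaj == 0 && nmin != omin then false
      else if omin > nmin then false
      else if nmin > omin then true
      else if opat > npat then false
      else if npat > opat then true
      else if (pvVerSplitA new).2 != "" && (pvVerSplitA old).2 == "" then false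
      else if (pvVerSplitA old).2 != "" && (pvVerSplitA new).2 == "" then true
      else decide ((pvVerSplitA old).2 ≤ (pvVerSplitA new).2)
    | _, _ => false   -- not reached inside Pre_ (Python raises ValueError here)

-- ===== PORT B =====
-- head, _, suffix = ver.partition("_")  (ported via find + slices; exact)
def pvPartitionUnd (ver : String) : String × String :=
  let i := PySem.Str.find ver "_"
  if i = -1 then (ver, "")
  else (PySem.Str.slice ver none (some i), PySem.Str.slice ver (some (i + 1)) none)

-- tokens(ver) of Source B: (major, flattened int key list); none exactly where Python raises ValueError
def pvTokensB (ver : String) : Option (Int × List Int) :=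
  match ((PySem.Str.split? (pvPartitionUnd ver).1 ".").getD []).map PySem.Int.ofStr? with
  | [some a, some b, some c] =>
      some (a, [b, c, if (pvPartitionUnd ver).2 == "" then 1 else 0]
              ++ (pvPartitionUnd ver).2.toList.map (fun ch => (ch.toNat : Int)))
  | _ => none

-- lex_ge(xs, ys) of Source B: recursive lexicographic comparison of int lists, xs >= ys
def pvLexGe : List Int → List Int → Bool
  | _, [] => true
  | [], _ :: _ => false
  | x :: xs, y :: ys => if x != y then decide (y < x) else pvLexGe xs ys

def is_semver_compatible_upgrade_alt (old : String) (new : String) : Bool :=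
  if old == new then true
  else
    match pvTokensB old, pvTokensB new with
    | some (omaj, okey), some (nmaj, nkey) =>
      if nmaj != omaj || (nmaj == 0 && nkey.headD 0 != okey.headD 0) then false
      else pvLexGe nkey okey
    | _, _ => false   -- not reached inside Pre_ (Python raises ValueError here)

-- ===== PRECONDITION & SPEC =====
-- version part (before the first "_") splits on "." into exactly three int()-parseable pieces
def pvParts (ver : String) : List (Option Int) :=
  ((PySem.Str.split? (((PySem.Str.splitMax? ver "_" 1).getD []).headD "") ".").getD []).map PySem.Int.ofStr?
def pvParsesOK (ver : String) : Bool :=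
  (pvParts ver).length == 3 && (pvParts ver).all Option.isSome

-- Pre_ excludes exactly the inputs where Python A raises ValueError (malformed version strings);
-- A returns normally iff old == new or both version parts parse as maj.min.patch ints.
def Pre_is_semver_compatible_upgrade (old : String) (new : String) : Prop :=
  old = new ∨ (pvParsesOK old = true ∧ pvParsesOK new = true)
instance (old : String) (new : String) : Decidable (Pre_is_semver_compatible_upgrade old new) := by unfold Pre_is_semver_compatible_upgrade; infer_instance

def pvWitness_is_semver_compatible_upgrade : String × String := ("1.2.3_beta", "1.2.4")

def Spec_is_semver_compatible_upgrade (old : String) (new : String) (out : Bool) : Prop := out = is_semver_compatible_upgrade_alt old new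
instance (old : String) (new : String) (out : Bool) : Decidable (Spec_is_semver_compatible_upgrade old new out) := by unfold Spec_is_semver_compatible_upgrade; infer_instance

-- ===== CLAIM (what is proved, stated in full; the proofs are below) =====
def Claim_equal_is_semver_compatible_upgrade : Prop := ∀ (old : String) (new : String), Dom_is_semver_compatible_upgrade old new → Pre_is_semver_compatible_upgrade old new → Spec_is_semver_compatible_upgrade old new (is_semver_compatible_upgrade old new)

-- ===== LEMMAS AND PROOFS =====

-- take/drop at the takeWhile boundary
theorem pv_take_takeWhile (p : Char → Bool) (cs : List Char) :
    List.take (cs.takeWhile p).length cs = cs.takeWhile p := by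
  induction cs with
  | nil => simp
  | cons c t ih => by_cases h : p c <;> simp [h, ih]

theorem pv_drop_takeWhile (p : Char → Bool) (cs : List Char) :
    List.drop (cs.takeWhile p).length cs = cs.dropWhile p := by
  induction cs with
  | nil => simp
  | cons c t ih => by_cases h : p c <;> simp [h, ih]

-- splitOnMax.go with maxsplit already exhausted
theorem pv_go_zero (fuel : Nat) (l cur : List Char) (acc : List (List Char)) :
    PySem.Chars.splitOnMax.go ['_'] fuel 0 l cur acc = ((cur.reverse ++ l) :: acc).reverse := by
  cases fuel with
  | zero => rfl
  | succ f => cases l <;> simp [PySem.Chars.splitOnMax.go]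

-- splitOnMax.go with maxsplit 1 splits at the first '_'
theorem pv_go_one (l : List Char) : ∀ (fuel : Nat) (cur : List Char) (acc : List (List Char)),
    l.length < fuel →
    PySem.Chars.splitOnMax.go ['_'] fuel 1 l cur acc =
      (if '_' ∈ l then
        (l.dropWhile (· ≠ '_')).drop 1 :: (cur.reverse ++ l.takeWhile (· ≠ '_')) :: acc
       else (cur.reverse ++ l) :: acc).reverse := by
  induction l with
  | nil =>
    intro fuel cur acc h
    cases fuel with
    | zero => omega
    | succ f => simp [PySem.Chars.splitOnMax.go]
  | cons c rest ih =>
    intro fuel cur acc h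
    cases fuel with
    | zero => omega
    | succ f =>
      by_cases hc : c = '_'
      · subst hc
        simp only [PySem.Chars.splitOnMax.go, List.isPrefixOf, if_neg (by omega : ¬ (1:Nat) = 0)]
        rw [if_pos (by decide : ('_' == '_' && true) = true), pv_go_zero]
        simp
      · have hcs : ¬ '_' = c := fun hx => hc hx.symm
        have hpre : List.isPrefixOf ['_'] (c :: rest) = false := by
          simp [List.isPrefixOf, hcs]
        simp only [PySem.Chars.splitOnMax.go, hpre, if_neg (by omega : ¬ (1:Nat) = 0),
          Bool.false_eq_true, if_false]
        rw [ih f (c :: cur) acc (by simpa using Nat.lt_of_succ_lt_succ h)]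
        by_cases hm : '_' ∈ rest <;>
          simp [hm, hc, hcs]

-- find.go locates the first '_'
theorem pv_findgo (cs : List Char) : ∀ (k : Nat),
    PySem.Chars.find.go ['_'] cs k =
      (if '_' ∈ cs then ((k : Int) + ((cs.takeWhile (· ≠ '_')).length : Int)) else -1) := by
  induction cs with
  | nil => intro k; simp [PySem.Chars.find.go]
  | cons c rest ih =>
    intro k
    by_cases hc : c = '_'
    · subst hc
      simp [PySem.Chars.find.go, List.isPrefixOf]
    · have hcs : ¬ '_' = c := fun hx => hc hx.symm
      have hpre : List.isPrefixOf ['_'] (c :: rest) = false := by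
        simp [List.isPrefixOf, hcs]
      simp only [PySem.Chars.find.go, hpre, Bool.false_eq_true, if_false]
      rw [ih (k + 1)]
      by_cases hm : '_' ∈ rest <;> simp [hm, hc, hcs]
      omega

-- both splitters agree: A's ver.split("_", 1) = B's head/suffix of ver.partition("_")
theorem pv_split_eq_partition (ver : String) : pvPartitionUnd ver = pvVerSplitA ver := by
  have hsm : PySem.Str.splitMax? ver "_" 1 =
      some ((PySem.Chars.splitOnMax ver.toList ['_'] 1).map String.ofList) := by
    simp [PySem.Str.splitMax?, PySem.Chars.splitMax?]
  have hgo : PySem.Chars.splitOnMax ver.toList ['_'] 1 =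
      PySem.Chars.splitOnMax.go ['_'] (ver.toList.length + 1) 1 ver.toList [] [] := rfl
  have hfind : PySem.Str.find ver "_" =
      (if '_' ∈ ver.toList then (((ver.toList.takeWhile (· ≠ '_')).length : Int)) else -1) := by
    have h1 : ("_" : String).toList = ['_'] := rfl
    rw [PySem.Str.find_eq, h1, PySem.Chars.find, pv_findgo ver.toList 0]
    simp
  by_cases hm : '_' ∈ ver.toList
  · have htw : (ver.toList.takeWhile (· ≠ '_')).length ≤ ver.toList.length :=
      (List.takeWhile_sublist _).length_le
    unfold pvPartitionUnd pvVerSplitA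
    rw [hfind, hsm, hgo, pv_go_one ver.toList (ver.toList.length + 1) [] [] (by omega)]
    simp only [hm, if_true]
    rw [if_neg (by omega : ¬ (((ver.toList.takeWhile (· ≠ '_')).length : Int)) = -1)]
    simp only [List.nil_append, List.reverse_cons, List.reverse_nil, List.nil_append]
    simp only [PySem.Str.slice, PySem.Chars.slice_eq_listSlice]
    rw [PySem.List.slice_to ver.toList (by omega), PySem.List.slice_from ver.toList (by omega)]
    have h1 : ((((ver.toList.takeWhile (· ≠ '_')).length : Int))).toNat
        = (ver.toList.takeWhile (· ≠ '_')).length := by omega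
    have h2 : ((((ver.toList.takeWhile (· ≠ '_')).length : Int)) + 1).toNat
        = (ver.toList.takeWhile (· ≠ '_')).length + 1 := by omega
    rw [h1, h2, pv_take_takeWhile, ← List.drop_drop, pv_drop_takeWhile]
    simp
  · unfold pvPartitionUnd pvVerSplitA
    rw [hfind, hsm, hgo, pv_go_one ver.toList (ver.toList.length + 1) [] [] (by omega)]
    simp [hm, String.ofList_toList]

-- B's tokens are A's parse of the split head, paired with the flattened key of the split suffix
theorem pv_tokensB_eq (ver : String) :
    pvTokensB ver = match pvParse3A (pvVerSplitA ver).1 with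
      | some (a, b, c) => some (a, [b, c, if (pvVerSplitA ver).2 == "" then 1 else 0]
              ++ (pvVerSplitA ver).2.toList.map (fun ch => (ch.toNat : Int)))
      | none => none := by
  unfold pvTokensB pvParse3A
  rw [pv_split_eq_partition]
  generalize ((PySem.Str.split? (pvVerSplitA ver).1 ".").getD []).map PySem.Int.ofStr? = parts
  rcases parts with _ | ⟨_ | a, _ | ⟨_ | b, _ | ⟨_ | c, _ | d⟩⟩⟩ <;> rfl

-- pvParsesOK means A's parse of the split head succeeds
theorem pv_parsesOK_some (ver : String) (h : pvParsesOK ver = true) :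
    (pvParse3A (pvVerSplitA ver).1).isSome := by
  have hhead : (pvVerSplitA ver).1 = ((PySem.Str.splitMax? ver "_" 1).getD []).headD "" := by
    unfold pvVerSplitA
    rcases (PySem.Str.splitMax? ver "_" 1).getD [] with _ | ⟨a, _ | ⟨b, _ | _⟩⟩ <;> rfl
  have hp : pvParts ver = ((PySem.Str.split? (pvVerSplitA ver).1 ".").getD []).map PySem.Int.ofStr? := by
    rw [pvParts, ← hhead]
  unfold pvParsesOK at h
  rw [hp] at h
  unfold pvParse3A
  generalize ((PySem.Str.split? (pvVerSplitA ver).1 ".").getD []).map PySem.Int.ofStr? = parts at h ⊢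
  rcases parts with _ | ⟨_ | a, _ | ⟨_ | b, _ | ⟨_ | c, _ | d⟩⟩⟩ <;> simp_all

-- lexicographic comparison of codepoint lists is Python's string >= (codepoint lexicographic)
theorem pvLexGe_cons (x y : Int) (xs ys : List Int) :
    pvLexGe (x :: xs) (y :: ys) = if x != y then decide (y < x) else pvLexGe xs ys := rfl

theorem pv_lexge_ords (a : List Char) : ∀ (b : List Char),
    pvLexGe (a.map (fun c => (c.toNat : Int))) (b.map (fun c => (c.toNat : Int))) = !decide (a < b) := by
  induction a with
  | nil => intro b; cases b <;> simp [pvLexGe, List.nil_lt_cons]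
  | cons c t ih =>
    intro b
    cases b with
    | nil => simp [pvLexGe, List.not_lt.mpr (List.nil_le _)]
    | cons d u =>
      simp only [List.map, pvLexGe, List.cons_lt_cons_iff]
      by_cases h : c = d
      · subst h; rw [if_neg (by simp)]
        rw [ih u]
        simp
      · have hne : c.toNat ≠ d.toNat :=
          fun hx => h (by apply Char.ext; unfold Char.toNat at hx; exact UInt32.toNat_inj.mp hx)
        have hlt : (c < d) ↔ c.toNat < d.toNat := Iff.rfl
        rw [if_pos (by simpa using fun hx => hne (by exact_mod_cast hx))]
        by_cases hcd : c.toNat < d.toNat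
        · simp [hlt, hcd, h, show ¬ ((d.toNat:Int) < (c.toNat:Int)) by omega]
        · simp [hlt, hcd, h, show ((d.toNat:Int) < (c.toNat:Int)) by omega]

-- A's three suffix steps = lexicographic comparison of [rank] ++ codepoints
theorem pv_suffix_eq (nsuf osuf : String) :
    (if nsuf != "" && osuf == "" then false
     else if osuf != "" && nsuf == "" then true
     else decide (osuf ≤ nsuf))
    = pvLexGe ((if nsuf == "" then 1 else 0) :: nsuf.toList.map (fun c => (c.toNat : Int)))
              ((if osuf == "" then 1 else 0) :: osuf.toList.map (fun c => (c.toNat : Int))) := by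
  rw [pvLexGe_cons]
  by_cases hn : nsuf = "" <;> by_cases ho : osuf = ""
  · subst hn; subst ho; simp [pvLexGe]
  · subst hn
    rw [show (("" : String) == "") = true from rfl,
        show (osuf == "") = false from beq_eq_false_iff_ne.mpr ho]
    simp [ho]
  · subst ho
    rw [show (("" : String) == "") = true from rfl,
        show (nsuf == "") = false from beq_eq_false_iff_ne.mpr hn]
    simp [hn]
  · rw [show (nsuf == "") = false from beq_eq_false_iff_ne.mpr hn,
        show (osuf == "") = false from beq_eq_false_iff_ne.mpr ho]
    rw [if_neg (by simp)]
    rw [pv_lexge_ords]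
    by_cases hlt : nsuf.toList < osuf.toList
    · have hnle : ¬ osuf ≤ nsuf :=
        fun hle => absurd (String.le_iff_toList_le.mp hle) (not_le.mpr hlt)
      simp [hlt, hnle]
    · have hle2 : osuf ≤ nsuf := String.le_iff_toList_le.mpr (not_lt.mp hlt)
      simp [hlt, hle2]

-- A's ladder tail = one lexicographic comparison of the flattened keys
theorem pv_tail_eq (nmin npat omin opat : Int) (nsuf osuf : String) :
    (if omin > nmin then false
     else if nmin > omin then true
     else if opat > npat then false
     else if npat > opat then true
     else if nsuf != "" && osuf == "" then false
     else if osuf != "" && nsuf == "" then true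
     else decide (osuf ≤ nsuf))
    = pvLexGe (nmin :: npat :: (if nsuf == "" then 1 else 0) :: nsuf.toList.map (fun c => (c.toNat : Int)))
              (omin :: opat :: (if osuf == "" then 1 else 0) :: osuf.toList.map (fun c => (c.toNat : Int))) := by
  rw [pvLexGe_cons]
  rcases lt_trichotomy nmin omin with h | h | h
  · rw [if_pos (bne_iff_ne.mpr h.ne)]
    simp [h, not_lt.mpr h.le]
  · subst h
    simp only [bne_self_eq_false, Bool.false_eq_true, if_false]
    rw [pvLexGe_cons]
    rcases lt_trichotomy npat opat with h2 | h2 | h2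
    · rw [if_pos (bne_iff_ne.mpr h2.ne)]
      simp [h2, not_lt.mpr h2.le]
    · subst h2
      simp only [bne_self_eq_false, Bool.false_eq_true, if_false]
      simp only [gt_iff_lt, lt_irrefl, if_false]
      exact pv_suffix_eq nsuf osuf
    · rw [if_pos (bne_iff_ne.mpr h2.ne')]
      simp [h2, not_lt.mpr h2.le]
  · rw [if_pos (bne_iff_ne.mpr h.ne')]
    simp [h, not_lt.mpr h.le]

-- ===== VERDICT (by name: the statement is the Claim_ definition above) =====
theorem is_semver_compatible_upgrade_spec : Claim_equal_is_semver_compatible_upgrade := by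
  intro old new _ hpre
  unfold Spec_is_semver_compatible_upgrade
  by_cases heq : old = new
  · subst heq
    simp [is_semver_compatible_upgrade, is_semver_compatible_upgrade_alt]
  · rcases hpre with h | ⟨ho, hn⟩
    · exact absurd h heq
    obtain ⟨⟨omaj, omin, opat⟩, hop⟩ := Option.isSome_iff_exists.mp (pv_parsesOK_some old ho)
    obtain ⟨⟨nmaj, nmin, npat⟩, hnp⟩ := Option.isSome_iff_exists.mp (pv_parsesOK_some new hn)
    unfold is_semver_compatible_upgrade is_semver_compatible_upgrade_alt
    rw [show (old == new) = false from beq_eq_false_iff_ne.mpr heq]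
    simp only [Bool.false_eq_true, if_false]
    rw [pv_tokensB_eq old, pv_tokensB_eq new, hop, hnp]
    simp only [List.headD, List.cons_append, List.nil_append]
    rw [← pv_tail_eq nmin npat omin opat (pvVerSplitA new).2 (pvVerSplitA old).2]
    cases hb : (nmaj != omaj)
    · cases hz : (nmaj == 0 && nmin != omin) <;> simp
    · simp
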